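-- pv_equiv track=rewrite | github.com/Zimzozaur/LeetPython | Design/P1286_Iterator_for_Combination_test.py | all_combinations
-- ===== SOURCE A (Python) =====
-- def all_combinations(string, chars):
--     result = []
--
--     for i in range(len(string) - chars + 1):
--         if chars == 1:
--             result.append(string[i])
--             continue
--         for j in range(1, len(string) - chars + 2):
--             if chars == 2 and i < j:
--                 result.append(string[i] + string[j])
--                 continue
--             for x in range(2, len(string) - chars + 3):
--                 if chars == 3 and i < j < x:
--                     result.append(string[i] + string[j] + string[x])
--                     continue
--                 for y in range(3, len(string) - chars + 4):
--                     if chars == 4 and i < j < x < y: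
--                         result.append(string[i] + string[j] + string[x] + string[y])
--
--     return result
-- ===== SOURCE B (Python) =====
-- def all_combinations(string, chars):
--     # Only chars in 1..4 produce output (as in the original design problem).
--     if chars not in (1, 2, 3, 4):
--         return []
--     n = len(string)
--
--     def go(start, k):
--         if k == 1:
--             return [string[i] for i in range(start, n)]
--         return [string[i] + rest
--                 for i in range(start, n - k + 1)
--                 for rest in go(i + 1, k - 1)]
--
--     return go(0, chars)
-- ===== Notes on version B (the rewrite author's own statement) =====
-- stated objective: faster
-- what changed: B replaces A's fixed four-level nested loops with filter guards (always n^4 iterations for every chars) by a recursive combination generator that only descends chars levels over the still-eligible index range, after an explicit guard returning [] for chars outside 1..4.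
import Mathlib
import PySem

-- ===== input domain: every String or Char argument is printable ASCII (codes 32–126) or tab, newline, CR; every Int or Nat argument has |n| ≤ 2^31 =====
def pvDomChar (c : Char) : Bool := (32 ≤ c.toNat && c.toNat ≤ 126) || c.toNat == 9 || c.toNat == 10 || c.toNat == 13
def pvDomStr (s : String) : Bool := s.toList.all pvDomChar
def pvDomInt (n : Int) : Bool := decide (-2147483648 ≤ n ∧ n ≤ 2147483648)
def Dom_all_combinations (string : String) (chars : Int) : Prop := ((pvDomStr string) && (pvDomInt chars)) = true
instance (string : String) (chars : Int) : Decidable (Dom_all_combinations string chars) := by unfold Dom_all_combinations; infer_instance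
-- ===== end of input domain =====

-- B generates the combinations by recursion to depth `chars` (empty for chars outside 1..4)
-- instead of A's fixed four nested index loops with guards; same returned list, proved below.

-- ===== PORT A =====
-- string[i] as a one-character string; every index A's loops reach is in range, so the
-- pyGetD default is never the value returned.
def pvC (s : List Char) (i : Int) : String := String.ofList [PySem.List.pyGetD s i ' ']

def all_combinations (string : String) (chars : Int) : List String :=
  let s := string.toList
  let n : Int := s.length
  (PySem.List.pyRange 0 (n - chars + 1) 1).foldl (fun result i =>
    if chars = 1 then result ++ [pvC s i]
    else (PySem.List.pyRange 1 (n - chars + 2) 1).foldl (fun result j =>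
      if chars = 2 ∧ i < j then result ++ [pvC s i ++ pvC s j]
      else (PySem.List.pyRange 2 (n - chars + 3) 1).foldl (fun result x =>
        if chars = 3 ∧ i < j ∧ j < x then result ++ [pvC s i ++ pvC s j ++ pvC s x]
        else (PySem.List.pyRange 3 (n - chars + 4) 1).foldl (fun result y =>
          if chars = 4 ∧ i < j ∧ j < x ∧ x < y then
            result ++ [pvC s i ++ pvC s j ++ pvC s x ++ pvC s y]
          else result) result) result) result) []

-- ===== PORT B =====
-- go(start, k) from Source B; k is the remaining depth (go is only ever called with
-- 1 ≤ k ≤ 4; the k = 0 branch is unreachable).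
def pvGo (s : List Char) (start : Int) (k : Nat) : List String :=
  match k with
  | 0 => []
  | 1 => (PySem.List.pyRange start (s.length : Int) 1).map (fun i => pvC s i)
  | (k' + 2) =>
    (PySem.List.pyRange start ((s.length : Int) - ((k' : Int) + 2) + 1) 1).flatMap (fun i =>
      (pvGo s (i + 1) (k' + 1)).map (fun rest => pvC s i ++ rest))

def all_combinations_alt (string : String) (chars : Int) : List String :=
  if chars = 1 ∨ chars = 2 ∨ chars = 3 ∨ chars = 4 then
    pvGo string.toList 0 chars.toNat
  else []

-- ===== PRECONDITION & SPEC =====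
def Spec_all_combinations (string : String) (chars : Int) (out : List String) : Prop := out = all_combinations_alt string chars
instance (string : String) (chars : Int) (out : List String) : Decidable (Spec_all_combinations string chars out) := by unfold Spec_all_combinations; infer_instance

-- ===== CLAIM (what is proved, stated in full; the proofs are below) =====
def Claim_equal_all_combinations : Prop := ∀ (string : String) (chars : Int), Dom_all_combinations string chars → Spec_all_combinations string chars (all_combinations string chars)

-- ===== LEMMAS AND PROOFS =====

-- flatMap over a constant [] is []
theorem pv_flatMap_nil {α β : Type} (l : List α) : l.flatMap (fun _ => ([] : List β)) = [] := by
  induction l with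
  | nil => rfl
  | cons a t ih => simp [List.flatMap_cons, ih]

-- pull a guard that does not depend on the element out of a flatMap
theorem pv_flatMap_ite_const {α β : Type} (l : List α) (P : Prop) [Decidable P]
    (f : α → List β) :
    l.flatMap (fun x => if P then f x else []) = if P then l.flatMap f else [] := by
  by_cases h : P <;> simp [h, pv_flatMap_nil]

-- turn a per-element guard into a filter
theorem pv_flatMap_ite {α β : Type} (l : List α) (p : α → Prop) [DecidablePred p]
    (f : α → List β) :
    l.flatMap (fun x => if p x then f x else []) = (l.filter (fun x => decide (p x))).flatMap f := by
  induction l with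
  | nil => rfl
  | cons a t ih =>
    by_cases h : p a <;> simp [List.flatMap_cons, h, ih]

-- split off the element-independent half of a conjunctive filter under a map
theorem pv_map_filter_and {α β : Type} (l : List α) (P : Prop) [Decidable P]
    (q : α → Prop) [DecidablePred q] (f : α → β) :
    (l.filter (fun x => decide (P ∧ q x))).map f =
      if P then (l.filter (fun x => decide (q x))).map f else [] := by
  by_cases h : P <;> simp [h]

-- filtering range [a, b) by (c < ·) with a ≤ c+1 is the range [c+1, b)
theorem pv_filter_range (a b c : Int) (h : a ≤ c + 1) :
    (PySem.List.pyRange a b 1).filter (fun x => decide (c < x)) = PySem.List.pyRange (c + 1) b 1 := by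
  by_cases hb : c + 1 ≤ b
  · rw [PySem.List.pyRange_one_append a (c + 1) b h hb, List.filter_append]
    have h1 : (PySem.List.pyRange a (c + 1) 1).filter (fun x => decide (c < x)) = [] := by
      rw [List.filter_eq_nil_iff]; intro x hx
      have := (PySem.List.mem_pyRange_one).1 hx
      simp; omega
    have h2 : (PySem.List.pyRange (c + 1) b 1).filter (fun x => decide (c < x)) = PySem.List.pyRange (c + 1) b 1 := by
      rw [List.filter_eq_self]; intro x hx
      have := (PySem.List.mem_pyRange_one).1 hx
      simp; omega
    rw [h1, h2, List.nil_append]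
  · rw [show PySem.List.pyRange (c + 1) b 1 = [] from PySem.List.pyRange_one_eq_nil (by omega),
        List.filter_eq_nil_iff]
    intro x hx
    have := (PySem.List.mem_pyRange_one).1 hx
    simp; omega

-- guarded flatMap over range [a, b) with a ≤ c+1 is flatMap over [c+1, b)
theorem pv_chain {β : Type} (a b c : Int) (h : a ≤ c + 1) (f : Int → List β) :
    (PySem.List.pyRange a b 1).flatMap (fun x => if c < x then f x else []) =
      (PySem.List.pyRange (c + 1) b 1).flatMap f := by
  rw [pv_flatMap_ite, pv_filter_range a b c h]

theorem pv_flatMap_single {α β : Type} (l : List α) (f : α → β) :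
    l.flatMap (fun x => [f x]) = l.map f := by
  induction l with
  | nil => rfl
  | cons a t ih => simp [List.flatMap_cons, ih]

theorem pv_case1 (s : List Char) :
    all_combinations (String.ofList s) 1 = all_combinations_alt (String.ofList s) 1 := by
  simp only [all_combinations, all_combinations_alt]
  norm_num
  simp only [pvGo]
  rw [← List.flatMap_def]
  exact pv_flatMap_single _ _

theorem pv_case2 (s : List Char) :
    all_combinations (String.ofList s) 2 = all_combinations_alt (String.ofList s) 2 := by
  simp only [all_combinations, all_combinations_alt]
  norm_num
  simp only [PySem.List.foldl_append_ite, PySem.List.foldl_append_eq_flatMap, List.nil_append]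
  change _ = pvGo _ _ 2
  simp only [pvGo]
  push_cast
  ring_nf
  refine List.flatMap_congr (fun i hi => ?_)
  have hi0 := (PySem.List.mem_pyRange_one).1 hi
  rw [pv_filter_range 1 _ i (by omega), show i + 1 = 1 + i from by ring]
  simp [List.map_map, Function.comp]

theorem pv_case3 (s : List Char) :
    all_combinations (String.ofList s) 3 = all_combinations_alt (String.ofList s) 3 := by
  simp only [all_combinations, all_combinations_alt]
  norm_num
  simp only [PySem.List.foldl_append_ite, PySem.List.foldl_append_eq_flatMap, List.nil_append]
  change _ = pvGo _ _ 3
  simp only [pvGo]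
  push_cast
  ring_nf
  refine List.flatMap_congr (fun i hi => ?_)
  have hi0 := (PySem.List.mem_pyRange_one).1 hi
  rw [List.map_flatMap]
  simp only [pv_map_filter_and]
  rw [pv_chain 1 _ i (by omega), show i + 1 = 1 + i from by ring]
  refine List.flatMap_congr (fun j hj => ?_)
  have hj0 := (PySem.List.mem_pyRange_one).1 hj
  rw [pv_filter_range 2 _ j (by omega), show j + 1 = 1 + j from by ring]
  simp [List.map_map, Function.comp, String.append_assoc]

theorem pv_case4 (s : List Char) :
    all_combinations (String.ofList s) 4 = all_combinations_alt (String.ofList s) 4 := by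
  simp only [all_combinations, all_combinations_alt]
  norm_num
  simp only [PySem.List.foldl_append_ite, PySem.List.foldl_append_eq_flatMap, List.nil_append]
  change _ = pvGo _ _ 4
  simp only [pvGo]
  push_cast
  ring_nf
  refine List.flatMap_congr (fun i hi => ?_)
  have hi0 := (PySem.List.mem_pyRange_one).1 hi
  rw [List.map_flatMap]
  simp only [pv_map_filter_and, pv_flatMap_ite_const]
  rw [pv_chain 1 _ i (by omega), show i + 1 = 1 + i from by ring]
  refine List.flatMap_congr (fun j hj => ?_)
  have hj0 := (PySem.List.mem_pyRange_one).1 hj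
  rw [List.map_map, List.map_flatMap]
  rw [pv_chain 2 _ j (by omega), show j + 1 = 1 + j from by ring]
  refine List.flatMap_congr (fun x hx => ?_)
  have hx0 := (PySem.List.mem_pyRange_one).1 hx
  rw [pv_filter_range 3 _ x (by omega), show x + 1 = 1 + x from by ring]
  simp [List.map_map, Function.comp, String.append_assoc]

theorem pv_case_other (s : List Char) (chars : Int)
    (h1 : chars ≠ 1) (h2 : chars ≠ 2) (h3 : chars ≠ 3) (h4 : chars ≠ 4) :
    all_combinations (String.ofList s) chars = all_combinations_alt (String.ofList s) chars := by
  simp only [all_combinations, all_combinations_alt]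
  rw [if_neg (by tauto)]
  simp only [h1, h2, h3, h4, false_and, if_false, List.foldl_fixed]

-- ===== VERDICT (by name: the statement is the Claim_ definition above) =====
theorem all_combinations_spec : Claim_equal_all_combinations := by
  unfold Claim_equal_all_combinations
  intro string chars _
  unfold Spec_all_combinations
  obtain ⟨s, rfl⟩ : ∃ s, String.ofList s = string := ⟨string.toList, String.ofList_toList⟩
  by_cases h1 : chars = 1
  · subst h1; exact pv_case1 s
  by_cases h2 : chars = 2
  · subst h2; exact pv_case2 s
  by_cases h3 : chars = 3
  · subst h3; exact pv_case3 s
  by_cases h4 : chars = 4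
  · subst h4; exact pv_case4 s
  exact pv_case_other s chars h1 h2 h3 h4
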